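-- pv_equiv track=rewrite | github.com/wongzc/NUS_IT5001_PE_answer | CS1010 2020_21 SEM1 PE1.py | calculate_areas
-- ===== SOURCE A (Python) =====
-- def calculate_areas(w_list, h_list):
--     ans=[0,0,0]
--     new_h=[0,0,0]
--     for j,h in enumerate(h_list):
--         new_h[j%3]+=h
--     for i,w in enumerate(w_list):
--         for j,h in enumerate(new_h):
--             a=w*h
--             index=(i+j)%3
--             ans[index]+=a
--     return tuple(ans)
-- ===== SOURCE B (Python) =====
-- def calculate_areas(w_list, h_list):
--     def bucket(xs):
--         t0 = t1 = t2 = 0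
--         for x in reversed(xs):
--             t0, t1, t2 = x + t2, t0, t1
--         return (t0, t1, t2)
--     W0, W1, W2 = bucket(w_list)
--     H0, H1, H2 = bucket(h_list)
--     return (W0 * H0 + W1 * H2 + W2 * H1,
--             W0 * H1 + W1 * H0 + W2 * H2,
--             W0 * H2 + W1 * H1 + W2 * H0)
-- ===== Notes on version B (the rewrite author's own statement) =====
-- stated objective: faster
-- what changed: B replaces A's enumerate/mod-index mutation loops (with a 3-wide inner loop per w element) by an iterative rotating-bucket pass over each list that yields its three mod-3 residue sums without index arithmetic, combined by one closed-form expression over the two length-3 tables.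
import Mathlib
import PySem

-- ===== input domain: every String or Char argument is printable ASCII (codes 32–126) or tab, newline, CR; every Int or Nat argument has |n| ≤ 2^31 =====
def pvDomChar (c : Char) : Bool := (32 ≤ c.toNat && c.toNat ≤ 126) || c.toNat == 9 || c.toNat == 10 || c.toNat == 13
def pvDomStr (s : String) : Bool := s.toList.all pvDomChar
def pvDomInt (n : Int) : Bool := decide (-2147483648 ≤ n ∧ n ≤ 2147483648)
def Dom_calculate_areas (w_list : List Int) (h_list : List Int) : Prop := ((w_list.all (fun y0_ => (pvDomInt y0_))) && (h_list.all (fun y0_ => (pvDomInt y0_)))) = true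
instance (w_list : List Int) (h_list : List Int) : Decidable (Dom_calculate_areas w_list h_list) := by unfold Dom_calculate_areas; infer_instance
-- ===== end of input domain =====

-- B replaces A's enumerate/mod-index mutation loops by a recursive rotating-bucket helper
-- that yields each list's three mod-3 residue sums, combined by one closed-form expression
-- (objective: faster by a constant factor, measured).


-- ===== PORT A =====
-- `l[k] += v`; exact for this file's use, where k is `… % 3` of a nonnegative
-- enumerate index, hence always 0, 1 or 2 (in range, nonnegative).
def pvBump (l : List Int) (k : Int) (v : Int) : List Int :=
  l.set k.toNat (l.getD k.toNat 0 + v)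

def calculate_areas (w_list : List Int) (h_list : List Int) : Int × Int × Int :=
  let new_h := (PySem.List.enumerate h_list).foldl
    (fun nh jh => pvBump nh (PySem.Int.mod jh.1 3) jh.2) [0, 0, 0]
  let ans := (PySem.List.enumerate w_list).foldl
    (fun a iw =>
      (PySem.List.enumerate new_h).foldl
        (fun a jh => pvBump a (PySem.Int.mod (iw.1 + jh.1) 3) (iw.2 * jh.2)) a)
    [0, 0, 0]
  (ans.getD 0 0, ans.getD 1 0, ans.getD 2 0)

-- ===== PORT B =====
-- Source B's `bucket`: one loop over reversed(xs); each element rotates the three sums.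
def pvRotBucket (xs : List Int) : Int × Int × Int :=
  xs.reverse.foldl (fun r x => (x + r.2.2, r.1, r.2.1)) (0, 0, 0)

def calculate_areas_alt (w_list : List Int) (h_list : List Int) : Int × Int × Int :=
  let W := pvRotBucket w_list
  let H := pvRotBucket h_list
  (W.1 * H.1 + W.2.1 * H.2.2 + W.2.2 * H.2.1,
   W.1 * H.2.1 + W.2.1 * H.1 + W.2.2 * H.2.2,
   W.1 * H.2.2 + W.2.1 * H.2.1 + W.2.2 * H.1)

-- ===== PRECONDITION & SPEC =====
def Spec_calculate_areas (w_list : List Int) (h_list : List Int) (out : Int × Int × Int) : Prop := out = calculate_areas_alt w_list h_list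
instance (w_list : List Int) (h_list : List Int) (out : Int × Int × Int) : Decidable (Spec_calculate_areas w_list h_list out) := by unfold Spec_calculate_areas; infer_instance

-- ===== CLAIM (what is proved, stated in full; the proofs are below) =====
def Claim_equal_calculate_areas : Prop := ∀ (w_list : List Int) (h_list : List Int), Dom_calculate_areas w_list h_list → Spec_calculate_areas w_list h_list (calculate_areas w_list h_list)

-- ===== LEMMAS AND PROOFS =====

def pvBuckets : List Int → Int → Int × Int × Int
  | [], _ => (0, 0, 0)
  | w :: t, s =>
    if PySem.Int.mod s 3 = 0 then ((pvBuckets t (s+1)).1 + w, (pvBuckets t (s+1)).2.1, (pvBuckets t (s+1)).2.2)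
    else if PySem.Int.mod s 3 = 1 then ((pvBuckets t (s+1)).1, (pvBuckets t (s+1)).2.1 + w, (pvBuckets t (s+1)).2.2)
    else ((pvBuckets t (s+1)).1, (pvBuckets t (s+1)).2.1, (pvBuckets t (s+1)).2.2 + w)
def pvContrib (h0 h1 h2 : Int) : List Int → Int → Int × Int × Int
  | [], _ => (0, 0, 0)
  | w :: t, s =>
    if PySem.Int.mod s 3 = 0 then
      ((pvContrib h0 h1 h2 t (s+1)).1 + w * h0, (pvContrib h0 h1 h2 t (s+1)).2.1 + w * h1, (pvContrib h0 h1 h2 t (s+1)).2.2 + w * h2)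
    else if PySem.Int.mod s 3 = 1 then
      ((pvContrib h0 h1 h2 t (s+1)).1 + w * h2, (pvContrib h0 h1 h2 t (s+1)).2.1 + w * h0, (pvContrib h0 h1 h2 t (s+1)).2.2 + w * h1)
    else
      ((pvContrib h0 h1 h2 t (s+1)).1 + w * h1, (pvContrib h0 h1 h2 t (s+1)).2.1 + w * h2, (pvContrib h0 h1 h2 t (s+1)).2.2 + w * h0)
lemma mod3_cases (s : Int) :
    PySem.Int.mod s 3 = 0 ∨ PySem.Int.mod s 3 = 1 ∨ PySem.Int.mod s 3 = 2 := by
  rw [PySem.Int.mod_eq_emod_of_pos (by norm_num)]; omega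
lemma mod3_s1 (s : Int) (h : PySem.Int.mod s 3 = 0) : PySem.Int.mod (s+1) 3 = 1 := by
  rw [PySem.Int.mod_eq_emod_of_pos (by norm_num)] at h ⊢; omega
lemma mod3_s2 (s : Int) (h : PySem.Int.mod s 3 = 1) : PySem.Int.mod (s+1) 3 = 2 := by
  rw [PySem.Int.mod_eq_emod_of_pos (by norm_num)] at h ⊢; omega
lemma mod3_s0 (s : Int) (h : PySem.Int.mod s 3 = 2) : PySem.Int.mod (s+1) 3 = 0 := by
  rw [PySem.Int.mod_eq_emod_of_pos (by norm_num)] at h ⊢; omega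

lemma W_char (ws : List Int) (s a b c : Int) :
    (PySem.List.enumerate ws s).foldl
        (fun acc iw => pvBump acc (PySem.Int.mod iw.1 3) iw.2) [a, b, c]
      = [a + (pvBuckets ws s).1, b + (pvBuckets ws s).2.1, c + (pvBuckets ws s).2.2] := by
  induction ws generalizing s a b c with
  | nil => simp only [PySem.List.enumerate_nil, List.foldl_nil, pvBuckets]; norm_num
  | cons w t ih =>
    rw [PySem.List.enumerate_cons, List.foldl_cons]
    rcases mod3_cases s with h | h | h
    · have hstep : pvBump [a, b, c] (PySem.Int.mod s 3) w = [a + w, b, c] := by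
        rw [h]; simp [pvBump]
      simp only [hstep]
      rw [ih]
      simp only [pvBuckets, h]
      norm_num
      ring
    · have hstep : pvBump [a, b, c] (PySem.Int.mod s 3) w = [a, b + w, c] := by
        rw [h]; simp [pvBump]
      simp only [hstep]; rw [ih]
      simp only [pvBuckets, h]; norm_num; ring
    · have hstep : pvBump [a, b, c] (PySem.Int.mod s 3) w = [a, b, c + w] := by
        rw [h]; simp [pvBump]
      simp only [hstep]; rw [ih]
      simp only [pvBuckets, h]; norm_num; ring

lemma inner_eval (h0 h1 h2 x y z s w : Int) :
    (PySem.List.enumerate [h0, h1, h2]).foldl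
        (fun a jh => pvBump a (PySem.Int.mod (s + jh.1) 3) (w * jh.2)) [x, y, z]
      = (if PySem.Int.mod s 3 = 0 then [x + w * h0, y + w * h1, z + w * h2]
        else if PySem.Int.mod s 3 = 1 then [x + w * h2, y + w * h0, z + w * h1]
        else [x + w * h1, y + w * h2, z + w * h0]) := by
  have e3 : PySem.List.enumerate [h0, h1, h2] (0 : Int) = [(0, h0), (1, h1), (2, h2)] := by
    norm_num [PySem.List.enumerate_cons, PySem.List.enumerate_nil]
  rw [show PySem.List.enumerate [h0, h1, h2] = PySem.List.enumerate [h0, h1, h2] (0:Int) from rfl, e3]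
  simp only [List.foldl_cons, List.foldl_nil, add_zero]
  rcases mod3_cases s with h | h | h
  · have g1 := mod3_s1 s h
    have g2 := mod3_s2 (s+1) g1
    rw [show s + (1:Int) = s + 1 from rfl, show PySem.Int.mod (s+2) 3 = PySem.Int.mod (s+1+1) 3 from by ring_nf]
    rw [h, g1, g2]
    simp [pvBump]
  · have g1 := mod3_s2 s h
    have g2 := mod3_s0 (s+1) g1
    rw [show PySem.Int.mod (s+2) 3 = PySem.Int.mod (s+1+1) 3 from by ring_nf]
    rw [h, g1, g2]
    simp [pvBump]
  · have g1 := mod3_s0 s h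
    have g2 := mod3_s1 (s+1) g1
    rw [show PySem.Int.mod (s+2) 3 = PySem.Int.mod (s+1+1) 3 from by ring_nf]
    rw [h, g1, g2]
    simp [pvBump]

lemma A_char (h0 h1 h2 : Int) (ws : List Int) (s x y z : Int) :
    (PySem.List.enumerate ws s).foldl
        (fun a iw =>
          (PySem.List.enumerate [h0, h1, h2]).foldl
            (fun a jh => pvBump a (PySem.Int.mod (iw.1 + jh.1) 3) (iw.2 * jh.2)) a) [x, y, z]
      = [x + (pvContrib h0 h1 h2 ws s).1,
         y + (pvContrib h0 h1 h2 ws s).2.1,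
         z + (pvContrib h0 h1 h2 ws s).2.2] := by
  induction ws generalizing s x y z with
  | nil => simp only [PySem.List.enumerate_nil, List.foldl_nil, pvContrib]; norm_num
  | cons w t ih =>
    rw [show PySem.List.enumerate (w :: t) s = (s, w) :: PySem.List.enumerate t (s + 1) by
      rw [PySem.List.enumerate_cons], List.foldl_cons]
    rw [inner_eval h0 h1 h2 x y z s w]
    rcases mod3_cases s with h | h | h
    · rw [if_pos h, ih]
      simp only [pvContrib, h]; norm_num
      refine ⟨by ring, by ring, by ring⟩
    · rw [if_neg (by rw [h]; norm_num), if_pos h, ih]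
      simp only [pvContrib, h]; norm_num
      refine ⟨by ring, by ring, by ring⟩
    · rw [if_neg (by rw [h]; norm_num), if_neg (by rw [h]; norm_num), ih]
      simp only [pvContrib, h]; norm_num
      refine ⟨by ring, by ring, by ring⟩

lemma contrib_eq_buckets (h0 h1 h2 : Int) (ws : List Int) (s : Int) :
    pvContrib h0 h1 h2 ws s
      = ((pvBuckets ws s).1 * h0 + (pvBuckets ws s).2.2 * h1 + (pvBuckets ws s).2.1 * h2,
         (pvBuckets ws s).2.1 * h0 + (pvBuckets ws s).1 * h1 + (pvBuckets ws s).2.2 * h2,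
         (pvBuckets ws s).2.2 * h0 + (pvBuckets ws s).2.1 * h1 + (pvBuckets ws s).1 * h2) := by
  induction ws generalizing s with
  | nil => simp only [pvBuckets, pvContrib]; norm_num
  | cons w t ih =>
    rcases mod3_cases s with h | h | h <;>
      · simp only [pvBuckets, pvContrib, h, ih]
        norm_num
        refine ⟨by ring, by ring, by ring⟩

-- advancing the start index by one rotates the three buckets
lemma buckets_shift (t : List Int) (s : Int) :
    pvBuckets t (s + 1)
      = ((pvBuckets t s).2.2, (pvBuckets t s).1, (pvBuckets t s).2.1) := by
  induction t generalizing s with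
  | nil => simp [pvBuckets]
  | cons w u ih =>
    rcases mod3_cases s with h | h | h
    · have h1 := mod3_s1 s h
      simp only [pvBuckets, h, h1, ih (s+1)]
      norm_num
    · have h1 := mod3_s2 s h
      simp only [pvBuckets, h, h1, ih (s+1)]
      norm_num
    · have h1 := mod3_s0 s h
      simp only [pvBuckets, h, h1, ih (s+1)]
      norm_num

lemma rotBucket_eq_buckets (xs : List Int) : pvRotBucket xs = pvBuckets xs 0 := by
  unfold pvRotBucket
  rw [List.foldl_reverse]
  induction xs with
  | nil => simp [pvBuckets]
  | cons x t ih =>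
    have h0 : PySem.Int.mod (0:Int) 3 = 0 := by decide
    have hs : pvBuckets t (0 + 1)
        = ((pvBuckets t 0).2.2, (pvBuckets t 0).1, (pvBuckets t 0).2.1) :=
      buckets_shift t 0
    simp only [List.foldr_cons, ih, pvBuckets, h0, if_pos, hs]
    norm_num
    ring

-- ===== VERDICT (by name: the statement is the Claim_ definition above) =====
theorem calculate_areas_spec : Claim_equal_calculate_areas := by
  intro w_list h_list _
  unfold Spec_calculate_areas calculate_areas calculate_areas_alt
  rw [W_char h_list 0 0 0 0]
  simp only [zero_add]
  rw [A_char, contrib_eq_buckets, rotBucket_eq_buckets, rotBucket_eq_buckets]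
  simp only [List.getD]
  norm_num
  refine ⟨by ring, by ring, by ring⟩
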